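-- pv_equiv track=rewrite | github.com/pdarbha/NLP-P2 | P2_release/train_hmm.py | gen_word_tag_dict
-- ===== SOURCE A (Python) =====
-- def gen_word_tag_dict(sentence, tags):
--     dic = {}
--     for word, tag in list(zip(sentence, tags)):
--         if not tag in dic:
--             dic[tag] = {}
--         if word in dic[tag]:
--             dic[tag][word] += 1
--         else:
--             dic[tag][word] = 1
--     return dic
-- ===== SOURCE B (Python) =====
-- def gen_word_tag_dict(sentence, tags):
--     # Pass 1: bucket words by tag (insertion order preserved).
--     groups = {}
--     for word, tag in zip(sentence, tags):
--         groups.setdefault(tag, []).append(word)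
--     # Pass 2: count each tag's bucket into a plain dict.
--     result = {}
--     for tag, words in groups.items():
--         counts = {}
--         for w in words:
--             counts[w] = counts.get(w, 0) + 1
--         result[tag] = counts
--     return result
-- ===== Notes on version B (the rewrite author's own statement) =====
-- stated objective: alternative
-- what changed: Replaces A's single interleaved loop that increments nested dict counts with two separate passes: first bucket words into a tag->list-of-words dict, then count each bucket into a plain dict.
import Mathlib
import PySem

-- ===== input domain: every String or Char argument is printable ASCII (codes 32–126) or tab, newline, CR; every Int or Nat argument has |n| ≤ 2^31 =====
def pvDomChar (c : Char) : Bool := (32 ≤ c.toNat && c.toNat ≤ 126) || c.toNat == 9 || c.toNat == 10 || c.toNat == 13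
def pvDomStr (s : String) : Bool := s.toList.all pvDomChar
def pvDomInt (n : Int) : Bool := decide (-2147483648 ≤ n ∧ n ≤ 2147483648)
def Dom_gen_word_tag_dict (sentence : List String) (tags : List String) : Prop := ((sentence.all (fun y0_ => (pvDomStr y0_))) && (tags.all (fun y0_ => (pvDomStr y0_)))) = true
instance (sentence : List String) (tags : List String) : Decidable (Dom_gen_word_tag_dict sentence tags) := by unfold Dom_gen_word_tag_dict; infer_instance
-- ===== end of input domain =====

-- B replaces A's interleaved nested-dict counting loop with two passes: bucket words by tag, then count each bucket (alternative decomposition, same cost).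

-- ===== PORT A =====
-- one iteration of A's loop body over (word, tag) = (wt.1, wt.2)
def aStep (dic : PySem.Dict String (PySem.Dict String Int)) (wt : String × String) :
    PySem.Dict String (PySem.Dict String Int) :=
  let dic := if dic.contains wt.2 then dic else dic.insert wt.2 PySem.Dict.empty
  let inner := dic.getD wt.2 PySem.Dict.empty
  if inner.contains wt.1 then dic.insert wt.2 (inner.insert wt.1 (inner.getD wt.1 0 + 1))
  else dic.insert wt.2 (inner.insert wt.1 1)

def gen_word_tag_dict (sentence : List String) (tags : List String) : List (String × List (String × Int)) :=
  let dic := (sentence.zip tags).foldl aStep PySem.Dict.empty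
  dic.items.map (fun p => (p.1, p.2.items))

-- ===== PORT B =====
-- pass 1 step: groups.setdefault(tag, []).append(word)
def bStep (g : PySem.Dict String (List String)) (wt : String × String) :
    PySem.Dict String (List String) :=
  g.modify wt.2 [] (· ++ [wt.1])

-- pass 2 inner loop: counts[w] = counts.get(w, 0) + 1
def countWords (ws : List String) : PySem.Dict String Int :=
  ws.foldl (fun c w => c.insert w (c.getD w 0 + 1)) PySem.Dict.empty

def gen_word_tag_dict_alt (sentence : List String) (tags : List String) : List (String × List (String × Int)) :=
  let groups := (sentence.zip tags).foldl bStep PySem.Dict.empty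
  groups.items.map (fun p => (p.1, (countWords p.2).items))

-- ===== PRECONDITION & SPEC =====
def Spec_gen_word_tag_dict (sentence : List String) (tags : List String) (out : List (String × List (String × Int))) : Prop := out = gen_word_tag_dict_alt sentence tags
instance (sentence : List String) (tags : List String) (out : List (String × List (String × Int))) : Decidable (Spec_gen_word_tag_dict sentence tags out) := by unfold Spec_gen_word_tag_dict; infer_instance

-- ===== CLAIM (what is proved, stated in full; the proofs are below) =====
def Claim_equal_gen_word_tag_dict : Prop := ∀ (sentence : List String) (tags : List String), Dom_gen_word_tag_dict sentence tags → Spec_gen_word_tag_dict sentence tags (gen_word_tag_dict sentence tags)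

-- ===== LEMMAS AND PROOFS =====

-- B's counting loop is Counter
lemma countWords_eq_counter (ws : List String) : countWords ws = PySem.Dict.counter ws :=
  PySem.Dict.foldl_insert_getD_add_one_eq_counter ws

-- the state invariant tying A's nested dict to B's grouping dict
lemma loop_inv (l : List (String × String))
    (g : PySem.Dict String (List String)) (d : PySem.Dict String (PySem.Dict String Int))
    (hk : d.items = g.items.map (fun p => (p.1, PySem.Dict.counter p.2)))
    (hn : g.keys.Nodup) :
    (l.foldl aStep d).items
      = (l.foldl bStep g).items.map (fun p => (p.1, PySem.Dict.counter p.2)) := by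
  induction l generalizing g d with
  | nil => simpa using hk
  | cons wt l ih =>
    obtain ⟨w, t⟩ := wt
    have hkeys : d.keys = g.keys := by
      simp only [PySem.Dict.keys, hk, List.map_map]; rfl
    have hnd : d.keys.Nodup := hkeys ▸ hn
    have hcont : d.contains t = g.contains t := by
      rw [PySem.Dict.contains_eq_decide_mem_keys, PySem.Dict.contains_eq_decide_mem_keys, hkeys]
    simp only [List.foldl_cons]
    by_cases hc : g.contains t = true
    · -- the tag is already a key of both dicts
      obtain ⟨ws, hws⟩ : ∃ ws, g.get? t = some ws := by
        have h := PySem.Dict.contains_eq_isSome_get? (d := g) (k := t)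
        rw [hc] at h
        exact Option.isSome_iff_exists.mp h.symm
      have hmem : (t, ws) ∈ g.items := by apply PySem.Dict.mem_items_of_get?_eq_some; exact hws
      have hdm : (t, PySem.Dict.counter ws) ∈ d.items := by
        rw [hk]; exact List.mem_map_of_mem hmem
      have hdget : d.getD t PySem.Dict.empty = PySem.Dict.counter ws := by
        apply PySem.Dict.getD_of_mem_items <;> first | exact hdm | exact hnd
      have hgget : g.getD t [] = ws := by apply PySem.Dict.getD_of_get?_eq_some; exact hws
      have hdc : d.contains t = true := hcont.trans hc
      have hins : aStep d (w, t)
          = d.insert t ((PySem.Dict.counter ws).insert w ((PySem.Dict.counter ws).getD w 0 + 1)) := by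
        by_cases hw : (PySem.Dict.counter ws).contains w = true
        · simp [aStep, hdc, hdget, hw]
        · simp only [Bool.not_eq_true] at hw
          have h0 : (PySem.Dict.counter ws).getD w 0 = 0 := by
            apply PySem.Dict.getD_of_not_contains; exact hw
          simp [aStep, hdc, hdget, hw, h0]
      have hcnt : PySem.Dict.counter (ws ++ [w])
          = (PySem.Dict.counter ws).insert w ((PySem.Dict.counter ws).getD w 0 + 1) := by
        rw [← PySem.Dict.foldl_insert_getD_add_one_eq_counter (ws ++ [w]), List.foldl_append,
            ← PySem.Dict.foldl_insert_getD_add_one_eq_counter ws]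
        rfl
      have hbs : bStep g (w, t) = g.insert t (ws ++ [w]) := by
        simp [bStep, PySem.Dict.modify, hgget]
      rw [hins, hbs]
      refine ih _ _ ?_ (PySem.Dict.nodup_keys_insert _ _ _ hn)
      have hiA : (d.insert t ((PySem.Dict.counter ws).insert w ((PySem.Dict.counter ws).getD w 0 + 1))).items
          = d.items.map (fun p => if p.1 == t then (t, (PySem.Dict.counter ws).insert w ((PySem.Dict.counter ws).getD w 0 + 1)) else p) := by
        apply PySem.Dict.items_insert_of_contains; exact hdc
      have hiB : (g.insert t (ws ++ [w])).items
          = g.items.map (fun p => if p.1 == t then (t, ws ++ [w]) else p) := by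
        apply PySem.Dict.items_insert_of_contains; exact hc
      rw [hiA, hiB, hk, List.map_map, List.map_map]
      refine List.map_congr_left (fun p _ => ?_)
      by_cases hp : p.1 = t
      · simp [hp, hcnt]
      · simp [hp]
    · -- fresh tag: both dicts append a new entry
      simp only [Bool.not_eq_true] at hc
      have hdc : d.contains t = false := hcont.trans hc
      have hgget : g.getD t [] = [] := by apply PySem.Dict.getD_of_not_contains; exact hc
      have hins : aStep d (w, t)
          = (d.insert t PySem.Dict.empty).insert t (PySem.Dict.empty.insert w (1 : Int)) := by
        simp [aStep, hdc]
      have hbs : bStep g (w, t) = g.insert t [w] := by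
        simp [bStep, PySem.Dict.modify, hgget]
      have hcnt1 : (PySem.Dict.counter [w] : PySem.Dict String Int)
          = PySem.Dict.empty.insert w (1 : Int) := by
        rw [← PySem.Dict.foldl_insert_getD_add_one_eq_counter [w]]; simp
      have htnk : t ∉ g.keys := by
        rw [PySem.Dict.contains_eq_decide_mem_keys] at hc
        simpa using hc
      rw [hins, hbs]
      refine ih _ _ ?_ (PySem.Dict.nodup_keys_insert _ _ _ hn)
      have hiB : (g.insert t [w]).items = g.items ++ [(t, [w])] := by
        apply PySem.Dict.items_insert_of_not_contains; exact hc
      have hiA1 : (d.insert t PySem.Dict.empty).items = d.items ++ [(t, PySem.Dict.empty)] := by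
        apply PySem.Dict.items_insert_of_not_contains; exact hdc
      have hiA2 : ((d.insert t PySem.Dict.empty).insert t (PySem.Dict.empty.insert w (1 : Int))).items
          = (d.insert t PySem.Dict.empty).items.map (fun p => if p.1 == t then (t, PySem.Dict.empty.insert w (1 : Int)) else p) := by
        apply PySem.Dict.items_insert_of_contains
        rw [PySem.Dict.contains_insert]; simp
      rw [hiA2, hiA1, hiB, List.map_append, List.map_append, hk]
      simp only [List.map_map]
      congr 1
      · refine List.map_congr_left (fun p hp => ?_)
        have : p.1 ≠ t := by
          intro hpt
          refine htnk (hpt ▸ ?_)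
          apply PySem.Dict.mem_keys_of_mem_items; exact hp
        simp [this]
      · simp [hcnt1]

-- ===== VERDICT (by name: the statement is the Claim_ definition above) =====
theorem gen_word_tag_dict_spec : Claim_equal_gen_word_tag_dict := by
  intro sentence tags _
  show _ = _
  simp only [gen_word_tag_dict, gen_word_tag_dict_alt]
  rw [loop_inv (sentence.zip tags) PySem.Dict.empty PySem.Dict.empty (by rfl) (by simp)]
  simp [countWords_eq_counter]
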